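-- pv_equiv track=rewrite | github.com/pointtonull/algorithms | src/find_repeated_in_sorted_arrays.py | _repeated
-- ===== SOURCE A (Python) =====
-- from typing import List, Iterable, Generator
--
-- def _repeated(input: Iterable[int]) -> Generator:  # O(n)
--     """
--     Generator of repeated elements from an iterable, assumes Iterable is sorted.
--     """
--     prev = None
--     repeated = 0
--     for item in input:
--         if prev is None:
--             prev = item
--             continue
--         elif item == prev:
--             if repeated == 0:
--                 yield item
--             repeated += 1
--         else:
--             prev = item
--             repeated = 0
-- ===== SOURCE B (Python) =====
-- def _repeated(input):
--     """Yield values that repeat: a windowed comparison of the list against its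
--     shifted copies (xs[1:], xs[2:]), no mutable scan state."""
--     xs = list(input)
--     tail1 = xs[1:]
--     tail2 = xs[2:]
--     if tail1 and tail1[0] == xs[0]:
--         yield tail1[0]
--     for a, b, c in zip(xs, tail1, tail2):
--         if b == c and a != b:
--             yield c
-- ===== Notes on version B (the rewrite author's own statement) =====
-- stated objective: alternative
-- what changed: Replaced A's stateful prev/repeated scan with a stateless windowed comparison: zip the list with its shifted copies xs[1:] and xs[2:] and yield c of each window (a,b,c) with b==c and a!=b, plus a separate head check for the first pair.
import Mathlib
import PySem

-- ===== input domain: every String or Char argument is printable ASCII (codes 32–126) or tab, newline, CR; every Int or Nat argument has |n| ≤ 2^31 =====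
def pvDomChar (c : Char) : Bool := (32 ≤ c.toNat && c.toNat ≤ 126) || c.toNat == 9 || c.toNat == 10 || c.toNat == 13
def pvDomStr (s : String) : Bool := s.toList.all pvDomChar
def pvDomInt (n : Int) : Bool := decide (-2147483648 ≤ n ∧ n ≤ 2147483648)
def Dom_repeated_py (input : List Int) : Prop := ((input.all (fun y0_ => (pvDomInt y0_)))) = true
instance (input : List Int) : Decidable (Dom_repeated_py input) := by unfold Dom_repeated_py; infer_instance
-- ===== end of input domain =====

-- B replaces A's stateful prev/repeated scan by a stateless windowed comparison of
-- the list against its shifted copies xs[1:], xs[2:] (alternative decomposition, same O(n)).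

-- ===== PORT A =====
-- loop state: prev (None initially), repeated counter; yields collected in order
def repeatedLoopA : Option Int → Int → List Int → List Int
  | _, _, [] => []
  | none, repeated, item :: rest => repeatedLoopA (some item) repeated rest
  | some prev, repeated, item :: rest =>
    if item == prev then
      (if repeated == 0 then [item] else []) ++ repeatedLoopA (some prev) (repeated + 1) rest
    else
      repeatedLoopA (some item) 0 rest

def repeated_py (input : List Int) : List Int :=
  repeatedLoopA none 0 input

-- ===== PORT B =====
-- xs[1:], xs[2:]; head check 'tail1 and tail1[0] == xs[0]'; then the zip3 loop.
def repeated_py_alt (input : List Int) : List Int :=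
  let tail1 := PySem.List.slice input (some 1) none
  let tail2 := PySem.List.slice input (some 2) none
  let headPart : List Int :=
    match tail1, input with
    | t :: _, x :: _ => if t == x then [t] else []
    | _, _ => []
  headPart ++ (input.zip (tail1.zip tail2)).foldr
      (fun t acc => if t.2.1 == t.2.2 && !(t.1 == t.2.1) then t.2.2 :: acc else acc) []

-- ===== PRECONDITION & SPEC =====
def Spec_repeated_py (input : List Int) (out : List Int) : Prop := out = repeated_py_alt input
instance (input : List Int) (out : List Int) : Decidable (Spec_repeated_py input out) := by unfold Spec_repeated_py; infer_instance

-- ===== CLAIM (what is proved, stated in full; the proofs are below) =====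
def Claim_equal_repeated_py : Prop := ∀ (input : List Int), Dom_repeated_py input → Spec_repeated_py input (repeated_py input)

-- ===== LEMMAS AND PROOFS =====

-- FB xs = B's zip3-fold on xs (with the slices rewritten to drops)
def FB (xs : List Int) : List Int :=
  (xs.zip ((xs.drop 1).zip (xs.drop 2))).foldr
      (fun t acc => if t.2.1 == t.2.2 && !(t.1 == t.2.1) then t.2.2 :: acc else acc) []

theorem FB_short (xs : List Int) (h : xs.length ≤ 2) : FB xs = [] := by
  match xs, h with
  | [], _ => rfl
  | [a], _ => rfl
  | [a, b], _ => rfl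

theorem FB_cons3 (a b c : Int) (t : List Int) :
    FB (a :: b :: c :: t) =
      (if b == c && !(a == b) then [c] else []) ++ FB (b :: c :: t) := by
  simp only [FB, List.drop, List.zip_cons_cons, List.foldr]
  split_ifs <;> simp_all

-- FB ignores a duplicated leading element
theorem FB_dup (p : Int) (t : List Int) : FB (p :: p :: t) = FB (p :: t) := by
  cases t with
  | nil => rfl
  | cons d t' => rw [FB_cons3]; simp

-- head part of B, as used in the invariant
def Hd (p : Int) (l : List Int) : List Int :=
  match l with
  | y :: _ => if y == p then [y] else []
  | [] => []

-- Combined loop invariant for A's state machine against the windowed form.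
theorem loop_inv (l : List Int) : ∀ p : Int,
    (repeatedLoopA (some p) 0 l = Hd p l ++ FB (p :: l)) ∧
    (∀ n : Int, 0 < n → repeatedLoopA (some p) n l = FB (p :: l)) := by
  induction l with
  | nil =>
    intro p
    refine ⟨rfl, fun n _ => rfl⟩
  | cons c t ih =>
    intro p
    have key : ∀ q : Int, q ≠ p → repeatedLoopA (some q) 0 t = FB (p :: q :: t) := by
      intro q hq
      cases t with
      | nil => simp [repeatedLoopA, FB_short]
      | cons d t' =>
        rw [(ih q).1, FB_cons3]
        have hpq : ¬ p = q := fun h => hq h.symm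
        simp only [Hd]
        by_cases hd : d = q
        · simp [hd, hpq]
        · simp [hd, hpq, show ¬ q = d from fun h => hd h.symm]
    constructor
    · by_cases h : c = p
      · subst h
        have h2 := (ih c).2 1 (by norm_num)
        simp [repeatedLoopA, Hd, h2, FB_dup]
      · simp only [repeatedLoopA, show (c == p) = false by simp [h], Bool.false_eq_true,
          if_false]
        rw [key c h]
        simp [Hd, show (c == p) = false by simp [h]]
    · intro n hn
      by_cases h : c = p
      · subst h
        have h2 := (ih c).2 (n + 1) (by omega)
        have hn' : (n == 0) = false := by simp [hn.ne']
        rw [show repeatedLoopA (some c) n (c :: t) =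
              repeatedLoopA (some c) (n + 1) t by simp [repeatedLoopA, hn'], h2, FB_dup]
      · simp only [repeatedLoopA, show (c == p) = false by simp [h], Bool.false_eq_true,
          if_false]
        exact key c h

-- B unfolded to Hd/FB
theorem alt_eq (x : Int) (l : List Int) :
    repeated_py_alt (x :: l) = Hd x l ++ FB (x :: l) := by
  simp only [repeated_py_alt, PySem.List.slice_from_one,
    show PySem.List.slice (x :: l) (some 2) none = (x :: l).drop 2 by
      simpa using PySem.List.slice_from_natCast (x :: l) 2]
  cases l <;> simp [Hd, FB]

-- ===== VERDICT (by name: the statement is the Claim_ definition above) =====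
theorem repeated_py_spec : Claim_equal_repeated_py := by
  intro input _
  unfold Spec_repeated_py repeated_py
  cases input with
  | nil => rfl
  | cons x l =>
    rw [show repeatedLoopA none 0 (x :: l) = repeatedLoopA (some x) 0 l from rfl,
      (loop_inv l x).1, alt_eq]
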